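-- pv_equiv track=rewrite | github.com/bmoss6/911_modeling | hypercube/hypercube_queue.py | create_state_space
-- ===== SOURCE A (Python) =====
-- def create_state_space(N=2):
--     S = [0, 0,1]
--     m2 = 2
--     n = 2
--     while n <= N:
--         m1 = m2
--         m2 = (2* m1)
--         i = m1
--         S.append(m1 + S[m2-i])
--         i = i+1
--         while i<m2:
--             S.append(m1 + S[m2-i])
--             i = i+1
--         n += 1
--     return S[1:]
-- ===== SOURCE B (Python) =====
-- def create_state_space(N=2):
--     # binary-reflected Gray code, computed per index by the closed-form bit formula
--     m = 2 if N < 2 else 2 ** N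
--     return [i ^ (i >> 1) for i in range(m)]
-- ===== Notes on version B (the rewrite author's own statement) =====
-- stated objective: simpler
-- what changed: Replaces the recursive reflect-and-append construction (inner loop reading S[m2-i] back out of the growing list) with the closed-form Gray-code formula i ^ (i >> 1) applied to each index of range(2**N).
import Mathlib
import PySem

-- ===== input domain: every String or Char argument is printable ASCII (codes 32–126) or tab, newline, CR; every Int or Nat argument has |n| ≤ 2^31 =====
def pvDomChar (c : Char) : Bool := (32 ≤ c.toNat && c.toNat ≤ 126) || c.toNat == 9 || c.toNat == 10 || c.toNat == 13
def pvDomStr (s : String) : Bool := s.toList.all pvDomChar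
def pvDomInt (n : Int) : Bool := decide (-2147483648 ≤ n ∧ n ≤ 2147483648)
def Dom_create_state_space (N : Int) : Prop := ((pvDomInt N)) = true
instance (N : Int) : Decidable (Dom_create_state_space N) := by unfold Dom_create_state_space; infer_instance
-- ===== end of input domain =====

-- B replaces A's recursive reflect-and-append construction with the closed-form
-- Gray-code formula i ^ (i >> 1) per index (objective: simpler).

-- ===== PORT A =====
-- inner while loop: 'while i < m2: S.append(m1 + S[m2-i]); i = i+1'
-- (Python's S[m2-i] is in range on every reachable state, so the pyGetD default 0 is never read)
def pvInnerA (S : List Int) (m1 i m2 : Int) : List Int :=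
  if i < m2 then
    pvInnerA (S ++ [m1 + PySem.List.pyGetD S (m2 - i) 0]) m1 (i + 1) m2
  else S
termination_by (m2 - i).toNat
decreasing_by omega

-- outer while loop: 'while n <= N: m1 = m2; m2 = 2*m1; i = m1; S.append(m1 + S[m2-i]); i = i+1; <inner>; n += 1'
def pvOuterA (S : List Int) (m2 n N : Int) : List Int :=
  if n ≤ N then
    pvOuterA
      (pvInnerA (S ++ [m2 + PySem.List.pyGetD S (2 * m2 - m2) 0]) m2 (m2 + 1) (2 * m2))
      (2 * m2) (n + 1) N
  else S
termination_by (N + 1 - n).toNat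
decreasing_by omega

def create_state_space (N : Int) : List Int :=
  PySem.List.slice (pvOuterA [0, 0, 1] 2 2 N) (some 1) none

-- ===== PORT B =====
-- 'i ^ (i >> 1)'
def pvGrayB (i : Int) : Int := PySem.Int.bxor i (i >>> (1 : Nat))

-- 'm = 2 if N < 2 else 2 ** N; return [i ^ (i >> 1) for i in range(m)]'  (N ≥ 2 in the ** branch)
def create_state_space_alt (N : Int) : List Int :=
  let m : Int := if N < 2 then 2 else 2 ^ N.toNat
  (PySem.List.pyRange 0 m).map pvGrayB

-- ===== PRECONDITION & SPEC =====
def Spec_create_state_space (N : Int) (out : List Int) : Prop := out = create_state_space_alt N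
instance (N : Int) (out : List Int) : Decidable (Spec_create_state_space N out) := by unfold Spec_create_state_space; infer_instance

-- ===== CLAIM (what is proved, stated in full; the proofs are below) =====
def Claim_equal_create_state_space : Prop := ∀ (N : Int), Dom_create_state_space N → Spec_create_state_space N (create_state_space N)

-- ===== LEMMAS AND PROOFS =====

-- the Gray-code value and the binary-reflected Gray sequence, on Nat
def pvGray (a : Nat) : Nat := a ^^^ (a >>> 1)
def pvG (p : Nat) : List Nat := (List.range (2 ^ p)).map pvGray
def pvCast (l : List Nat) : List Int := l.map (fun (a : Nat) => (a : Int))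

theorem pvCast_append (l l' : List Nat) : pvCast (l ++ l') = pvCast l ++ pvCast l' := by
  unfold pvCast; exact List.map_append ..

theorem pvCast_length (l : List Nat) : (pvCast l).length = l.length := by
  unfold pvCast; exact List.length_map ..

theorem pvCast_map (f : Nat → Nat) (l : List Nat) :
    pvCast (l.map f) = l.map (fun a => ((f a : Nat) : Int)) := by
  unfold pvCast; rw [List.map_map]; rfl

theorem pvG_length (p : Nat) : (pvG p).length = 2 ^ p := by
  unfold pvG; simp

theorem pvMaskSub (p : Nat) : ∀ j, j < 2 ^ p → 2 ^ p - 1 - j = (2 ^ p - 1) ^^^ j := by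
  induction p with
  | zero => intro j hj; interval_cases j; decide
  | succ p ih =>
    intro j hj
    have h2 : 2 ^ (p + 1) = 2 * 2 ^ p := by ring
    have hq : j / 2 < 2 ^ p := by omega
    have hih := ih (j / 2) hq
    have hmask : (2 ^ (p + 1) - 1) = Nat.bit true (2 ^ p - 1) := by
      simp [Nat.bit]; omega
    rcases Nat.even_or_odd j with h | h
    · have h' : j % 2 = 0 := Nat.even_iff.mp h
      have hdec : j = Nat.bit false (j / 2) := by simp [Nat.bit]; omega
      rw [hmask, hdec, Nat.xor_bit]
      simp [Nat.bit]; omega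
    · have h' : j % 2 = 1 := Nat.odd_iff.mp h
      have hdec : j = Nat.bit true (j / 2) := by simp [Nat.bit]; omega
      rw [hmask, hdec, Nat.xor_bit]
      simp [Nat.bit]; omega

theorem pvAddPow (p j : Nat) (hj : j < 2 ^ p) : 2 ^ p + j = 2 ^ p ^^^ j := by
  apply Nat.eq_of_testBit_eq
  intro i
  rcases Nat.lt_trichotomy i p with h1 | h1 | h1
  · rw [Nat.testBit_two_pow_add_gt h1, Nat.testBit_xor, Nat.testBit_two_pow_of_ne (by omega)]
    simp
  · subst h1
    rw [Nat.testBit_two_pow_add_eq, Nat.testBit_xor, Nat.testBit_two_pow_self,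
      Nat.testBit_lt_two_pow hj]
    simp
  · have hlt : 2 ^ p + j < 2 ^ i := by
      have hle : 2 ^ (p + 1) ≤ 2 ^ i := Nat.pow_le_pow_right (by omega) (by omega)
      have he : 2 ^ (p + 1) = 2 * 2 ^ p := by ring
      omega
    rw [Nat.testBit_lt_two_pow hlt, Nat.testBit_xor, Nat.testBit_two_pow_of_ne (by omega),
      Nat.testBit_lt_two_pow (by omega : j < 2 ^ i)]
    simp

theorem pvGray_xor (x y : Nat) : pvGray (x ^^^ y) = pvGray x ^^^ pvGray y := by
  unfold pvGray
  rw [Nat.shiftRight_xor_distrib]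
  ac_rfl

theorem pvShiftOne (a : Nat) : a >>> 1 = a / 2 := by
  rw [Nat.shiftRight_eq_div_pow]

theorem pvGray_two_pow (p : Nat) (hp : 1 ≤ p) : pvGray (2 ^ p) = 2 ^ p ^^^ 2 ^ (p - 1) := by
  unfold pvGray
  congr 1
  rw [pvShiftOne]
  have h : 2 ^ p = 2 * 2 ^ (p - 1) := by
    conv_lhs => rw [show p = (p - 1) + 1 by omega]
    ring
  omega

theorem pvGray_mask (p : Nat) (hp : 1 ≤ p) : pvGray (2 ^ p - 1) = 2 ^ (p - 1) := by
  unfold pvGray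
  have h1 : (2 ^ p - 1) >>> 1 = 2 ^ (p - 1) - 1 := by
    rw [Nat.shiftRight_eq_div_pow]
    have h : 2 ^ p = 2 * 2 ^ (p - 1) := by
      conv_lhs => rw [show p = (p - 1) + 1 by omega]
      ring
    norm_num
    omega
  rw [h1]
  apply Nat.eq_of_testBit_eq
  intro i
  rw [Nat.testBit_xor, Nat.testBit_two_pow_sub_one, Nat.testBit_two_pow_sub_one,
    Nat.testBit_two_pow]
  by_cases h1' : i < p - 1
  · have h2' : i < p := by omega
    have h3 : p - 1 ≠ i := by omega
    simp [h1', h2', h3]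
  · by_cases h4 : i = p - 1
    · subst h4
      have h5 : p - 1 < p := by omega
      simp [h5]
    · have h5 : ¬ i < p := by omega
      have h6 : p - 1 ≠ i := by omega
      simp [h1', h5, h6]

theorem pvGray_lt (p a : Nat) (ha : a < 2 ^ p) : pvGray a < 2 ^ p := by
  apply Nat.xor_lt_two_pow ha
  rw [pvShiftOne]
  omega

-- the reflection identity: for j < 2^p, gray(2^p + j) = 2^p + gray(2^p - 1 - j)
theorem pvReflect (p : Nat) (hp : 1 ≤ p) (j : Nat) (hj : j < 2 ^ p) :
    pvGray (2 ^ p + j) = 2 ^ p + pvGray (2 ^ p - 1 - j) := by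
  have hmask : 2 ^ p - 1 - j = (2 ^ p - 1) ^^^ j := pvMaskSub p j hj
  have hg : pvGray ((2 ^ p - 1) ^^^ j) = 2 ^ (p - 1) ^^^ pvGray j := by
    rw [pvGray_xor, pvGray_mask p hp]
  have hlt : 2 ^ (p - 1) ^^^ pvGray j < 2 ^ p := by
    apply Nat.xor_lt_two_pow
    · exact Nat.pow_lt_pow_right (by omega) (by omega)
    · exact pvGray_lt p j hj
  rw [hmask, hg, pvAddPow p _ hlt, pvAddPow p j hj, pvGray_xor,
    pvGray_two_pow p hp, Nat.xor_assoc]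

-- one reflection step of the sequence
theorem pvG_succ (p : Nat) (hp : 1 ≤ p) :
    pvG (p + 1) = pvG p ++ (List.range (2 ^ p)).map (fun t => 2 ^ p + pvGray (2 ^ p - 1 - t)) := by
  unfold pvG
  have h2 : 2 ^ (p + 1) = 2 ^ p + 2 ^ p := by ring
  rw [h2, List.range_add, List.map_append, List.map_map]
  congr 1
  apply List.map_congr_left
  intro t ht
  have ht' : t < 2 ^ p := List.mem_range.mp ht
  exact pvReflect p hp t ht'

-- indexing the A-side state 0 :: pvCast (pvG p)
theorem pvSget (p k : Nat) (hk1 : 1 ≤ k) (hk2 : k ≤ 2 ^ p) :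
    (0 :: pvCast (pvG p)).getD k 0 = ((pvGray (k - 1) : Nat) : Int) := by
  have hk : k = (k - 1) + 1 := by omega
  rw [hk, List.getD_cons_succ]
  have hlen : k - 1 < (pvCast (pvG p)).length := by
    rw [pvCast_length, pvG_length]; omega
  rw [List.getD_eq_getElem _ _ hlen]
  simp only [pvCast, pvG, List.getElem_map, List.getElem_range]
  norm_num

-- the inner while loop appends, for t = 0 .. d-1, the value m1 + S[d - t] (reading the original prefix)
theorem pvInnerA_spec : ∀ (d : Nat) (S : List Int) (m1 i m2 : Int),
    m2 - i = (d : Int) → d < S.length →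
    pvInnerA S m1 i m2 = S ++ (List.range d).map (fun t => m1 + S.getD (d - t) 0) := by
  intro d
  induction d with
  | zero =>
    intro S m1 i m2 h hd
    rw [pvInnerA, if_neg (by omega)]
    simp
  | succ d ih =>
    intro S m1 i m2 h hd
    rw [pvInnerA, if_pos (by omega : i < m2)]
    have hidx : m2 - i = (((d + 1 : Nat) : Int)) := by push_cast; omega
    rw [hidx, PySem.List.pyGetD_natCast]
    have htail : (List.range d).map
        (fun t => m1 + (S ++ [m1 + S.getD (d + 1) 0]).getD (d - t) 0)
        = (List.range d).map ((fun t => m1 + S.getD (d + 1 - t) 0) ∘ Nat.succ) := by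
      apply List.map_congr_left
      intro t ht
      have ht' : t < d := List.mem_range.mp ht
      simp only [Function.comp_apply]
      rw [List.getD_append _ _ _ _ (by omega)]
      congr 2
      omega
    rw [ih (S ++ [m1 + S.getD (d + 1) 0]) m1 (i + 1) m2 (by omega)
      (by rw [List.length_append]; simp; omega)]
    rw [htail, List.append_assoc, List.singleton_append,
      List.range_succ_eq_map, List.map_cons, List.map_map, Nat.sub_zero]

-- one outer iteration turns the state for pvG p into the state for pvG (p+1)
theorem pvStepA (p : Nat) (hp : 1 ≤ p) :
    pvInnerA ((0 :: pvCast (pvG p)) ++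
        [((2 ^ p : Nat) : Int) + PySem.List.pyGetD (0 :: pvCast (pvG p))
          (2 * ((2 ^ p : Nat) : Int) - ((2 ^ p : Nat) : Int)) 0])
      ((2 ^ p : Nat) : Int) (((2 ^ p : Nat) : Int) + 1) (2 * ((2 ^ p : Nat) : Int)) =
    0 :: pvCast (pvG (p + 1)) := by
  have hpow : 1 ≤ 2 ^ p := Nat.one_le_two_pow
  have hlen0 : (0 :: pvCast (pvG p)).length = 2 ^ p + 1 := by
    rw [List.length_cons, pvCast_length, pvG_length]
  have hidx0 : 2 * ((2 ^ p : Nat) : Int) - ((2 ^ p : Nat) : Int) = ((2 ^ p : Nat) : Int) := by ring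
  rw [hidx0, PySem.List.pyGetD_natCast]
  rw [pvInnerA_spec (2 ^ p - 1) _ _ _ _
    (by omega)
    (by rw [List.length_append, hlen0, List.length_cons]; omega)]
  rw [pvG_succ p hp, pvCast_append, pvCast_map]
  rw [List.append_assoc]
  show (0 :: pvCast (pvG p)) ++ _ = (0 :: pvCast (pvG p)) ++ _
  congr 1
  have hsplit : 2 ^ p = (2 ^ p - 1) + 1 := by omega
  conv_rhs => rw [hsplit, List.range_succ_eq_map, List.map_cons, List.map_map]
  rw [List.singleton_append]
  congr 1
  · -- head element: appended before the inner while loop runs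
    rw [pvSget p (2 ^ p) hpow (le_refl _)]
    rw [show 2 ^ p - 1 + 1 - 1 - 0 = 2 ^ p - 1 by omega,
      show 2 ^ p - 1 + 1 = 2 ^ p by omega]
    push_cast
    ring
  · -- the inner while loop's appends
    apply List.map_congr_left
    intro t ht
    have ht' : t < 2 ^ p - 1 := List.mem_range.mp ht
    simp only [Function.comp_apply, Nat.succ_eq_add_one]
    rw [List.getD_append _ _ _ _ (by rw [hlen0]; omega)]
    rw [pvSget p (2 ^ p - 1 - t) (by omega) (by omega)]
    rw [show 2 ^ p - 1 + 1 - 1 - (t + 1) = 2 ^ p - 1 - t - 1 by omega,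
      show 2 ^ p - 1 + 1 = 2 ^ p by omega]
    push_cast
    ring
-- the outer loop: with k iterations left and state for pvG p, it produces pvG (p + k)
theorem pvOuterA_spec : ∀ (k p : Nat), 1 ≤ p → ∀ (n N : Int), N + 1 - n = (k : Int) →
    pvOuterA (0 :: pvCast (pvG p)) ((2 ^ p : Nat) : Int) n N =
      0 :: pvCast (pvG (p + k)) := by
  intro k
  induction k with
  | zero =>
    intro p hp n N h
    rw [pvOuterA, if_neg (by omega)]
    rfl
  | succ k ih =>
    intro p hp n N h
    rw [pvOuterA, if_pos (by omega : n ≤ N)]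
    rw [pvStepA p hp]
    rw [show (2 : Int) * ((2 ^ p : Nat) : Int) = ((2 ^ (p + 1) : Nat) : Int) by push_cast; ring]
    rw [ih (p + 1) (by omega) (n + 1) N (by push_cast at h ⊢; omega)]
    rw [show p + 1 + k = p + (k + 1) by omega]

theorem pvGrayB_natCast (a : Nat) : pvGrayB ((a : Nat) : Int) = ((pvGray a : Nat) : Int) := by
  unfold pvGrayB pvGray
  have hs : ((a : Int) >>> (1 : Nat)) = ((a >>> 1 : Nat) : Int) := by
    simp [HShiftRight.hShiftRight, Int.shiftRight]
  rw [hs]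
  exact PySem.Int.bxor_natCast a (a >>> 1)

-- ===== VERDICT (by name: the statement is the Claim_ definition above) =====
theorem create_state_space_spec : Claim_equal_create_state_space := by
  intro N _
  unfold Spec_create_state_space create_state_space
  by_cases hN : N < 2
  · rw [pvOuterA, if_neg (by omega)]
    show _ = (PySem.List.pyRange 0 (if N < 2 then 2 else 2 ^ N.toNat)).map pvGrayB
    rw [if_pos hN]
    decide
  · have hk : N + 1 - 2 = (((N - 1).toNat : Nat) : Int) := by omega
    have hout := pvOuterA_spec (N - 1).toNat 1 (le_refl 1) 2 N hk
    rw [show ((2 ^ 1 : Nat) : Int) = 2 by norm_num] at hout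
    rw [show ([0, 0, 1] : List Int) = 0 :: pvCast (pvG 1) by decide]
    rw [hout, PySem.List.slice_from_one]
    show pvCast (pvG (1 + (N - 1).toNat)) =
      (PySem.List.pyRange 0 (if N < 2 then 2 else 2 ^ N.toNat)).map pvGrayB
    rw [if_neg hN]
    rw [show (2 : Int) ^ N.toNat = ((2 ^ N.toNat : Nat) : Int) by push_cast; rfl]
    rw [PySem.List.pyRange_zero_nat, List.map_map]
    rw [show 1 + (N - 1).toNat = N.toNat by omega]
    unfold pvCast pvG
    rw [List.map_map]
    apply List.map_congr_left
    intro a _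
    simp only [Function.comp]
    exact (pvGrayB_natCast a).symm
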